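-- pv_equiv track=rewrite | github.com/ScripterOne/ArcadeCommander | ACGameManager.py | _build_col_map
-- ===== SOURCE A (Python) =====
-- def _build_col_map(headers):
--     hset = {h: h for h in headers}
--     def pick(*cands):
--         for c in cands:
--             if c in hset:
--                 return c
--         return None
--     return {
--         "title": pick("Game Name", "Title", "Game", "Name"),
--         "developer": pick("Developer", "Manufacturer", "Vendor", "Publisher"),
--         "year": pick("Year", "Release Year", "Released"),
--         "platforms": pick("Platforms", "Platform", "System", "Emulator"),
--         "genres": pick("Genres", "Genre", "Category"),
--         "rec_platform": pick("Recommended Platform", "Recommended", "Best Platform"),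
--         "rank": pick("Rank", "Ranking"),
--     }
-- ===== SOURCE B (Python) =====
-- _FIELDS = [
--     ("title", ["Game Name", "Title", "Game", "Name"]),
--     ("developer", ["Developer", "Manufacturer", "Vendor", "Publisher"]),
--     ("year", ["Year", "Release Year", "Released"]),
--     ("platforms", ["Platforms", "Platform", "System", "Emulator"]),
--     ("genres", ["Genres", "Genre", "Category"]),
--     ("rec_platform", ["Recommended Platform", "Recommended", "Best Platform"]),
--     ("rank", ["Rank", "Ranking"]),
-- ]
--
--
-- def _build_col_map(headers):
--     out = {}
--     for field, cands in _FIELDS: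
--         rank = {c: i for i, c in enumerate(cands)}
--         best = None  # (rank, header) with the smallest rank seen so far
--         for h in headers:
--             r = rank.get(h)
--             if r is not None and (best is None or r < best[0]):
--                 best = (r, h)
--         out[field] = best[1] if best is not None else None
--     return out
-- ===== Notes on version B (the rewrite author's own statement) =====
-- stated objective: alternative
-- what changed: A builds a set of headers and, per field, scans the candidate list for the first member; B inverts the traversal: per field it builds a candidate->rank index and makes one pass over the headers keeping the header of minimal rank (argmin), defaulting all seven keys to None.
import Mathlib
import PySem

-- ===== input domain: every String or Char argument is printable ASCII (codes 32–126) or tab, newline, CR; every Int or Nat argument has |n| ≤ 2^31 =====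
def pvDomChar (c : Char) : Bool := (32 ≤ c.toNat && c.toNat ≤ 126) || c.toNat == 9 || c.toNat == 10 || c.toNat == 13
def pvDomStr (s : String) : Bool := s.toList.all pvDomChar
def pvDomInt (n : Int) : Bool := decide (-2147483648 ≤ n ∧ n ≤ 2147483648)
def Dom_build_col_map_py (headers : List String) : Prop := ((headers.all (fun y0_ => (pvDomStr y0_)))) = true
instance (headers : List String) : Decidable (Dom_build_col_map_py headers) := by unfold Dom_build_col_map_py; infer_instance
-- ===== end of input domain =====

-- B replaces A's per-field scan of the candidate list (with a header set) by a per-field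
-- single pass over the headers keeping the header of minimal candidate rank (alternative
-- decomposition, same result).

-- ===== PORT A =====
-- pick(*cands): first candidate that is a key of hset, else None
def pyPick (hset : PySem.Dict String String) (cands : List String) : Option String :=
  match cands with
  | [] => none
  | c :: rest => if hset.contains c then some c else pyPick hset rest

def build_col_map_py (headers : List String) : List (String × Option String) :=
  let hset : PySem.Dict String String :=
    headers.foldl (fun d h => d.insert h h) PySem.Dict.empty
  [("title", pyPick hset ["Game Name", "Title", "Game", "Name"]),
   ("developer", pyPick hset ["Developer", "Manufacturer", "Vendor", "Publisher"]),
   ("year", pyPick hset ["Year", "Release Year", "Released"]),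
   ("platforms", pyPick hset ["Platforms", "Platform", "System", "Emulator"]),
   ("genres", pyPick hset ["Genres", "Genre", "Category"]),
   ("rec_platform", pyPick hset ["Recommended Platform", "Recommended", "Best Platform"]),
   ("rank", pyPick hset ["Rank", "Ranking"])]

-- ===== PORT B =====
def pvFieldsB : List (String × List String) :=
  [("title", ["Game Name", "Title", "Game", "Name"]),
   ("developer", ["Developer", "Manufacturer", "Vendor", "Publisher"]),
   ("year", ["Year", "Release Year", "Released"]),
   ("platforms", ["Platforms", "Platform", "System", "Emulator"]),
   ("genres", ["Genres", "Genre", "Category"]),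
   ("rec_platform", ["Recommended Platform", "Recommended", "Best Platform"]),
   ("rank", ["Rank", "Ranking"])]

-- rank = {c: i for i, c in enumerate(cands)}
def pvRankDict (cands : List String) : PySem.Dict String Int :=
  (PySem.List.enumerate cands 0).foldl (fun d p => d.insert p.2 p.1) PySem.Dict.empty

-- the inner `for h in headers` loop maintaining best = (rank, header)
def pvBestFold (rank : PySem.Dict String Int) (headers : List String) : Option (Int × String) :=
  headers.foldl (fun best h =>
    match rank.get? h with
    | none => best
    | some r =>
      match best with
      | none => some (r, h)
      | some p => if r < p.1 then some (r, h) else some p) none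

def build_col_map_py_alt (headers : List String) : List (String × Option String) :=
  pvFieldsB.foldl (fun out p =>
    out ++ [(p.1,
      match pvBestFold (pvRankDict p.2) headers with
      | none => none
      | some q => some q.2)]) []

-- ===== PRECONDITION & SPEC =====
def Spec_build_col_map_py (headers : List String) (out : List (String × Option String)) : Prop := out = build_col_map_py_alt headers
instance (headers : List String) (out : List (String × Option String)) : Decidable (Spec_build_col_map_py headers out) := by unfold Spec_build_col_map_py; infer_instance

-- ===== CLAIM (what is proved, stated in full; the proofs are below) =====
def Claim_equal_build_col_map_py : Prop := ∀ (headers : List String), Dom_build_col_map_py headers → Spec_build_col_map_py headers (build_col_map_py headers)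

-- ===== LEMMAS AND PROOFS =====

-- A's pick with the membership test rewritten to list membership
def pickC (headers cs : List String) : Option String :=
  match cs with
  | [] => none
  | c :: rest => if headers.contains c then some c else pickC headers rest

-- first-match rank of h among cs, counting from k
def rkAux (k : Int) (cs : List String) (h : String) : Option Int :=
  match cs with
  | [] => none
  | c :: rest => if h = c then some k else rkAux (k + 1) rest h

-- first candidate (from rank k on) present in headers, with its rank
def nf (k : Int) (cs : List String) (headers : List String) : Option (Int × String) :=
  match cs with
  | [] => none
  | c :: rest => if headers.contains c then some (k, c) else nf (k + 1) rest headers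

-- "keep the strictly smaller rank, ties to the left", none = nothing yet
def mk2 (a b : Option (Int × String)) : Option (Int × String) :=
  match a, b with
  | none, b => b
  | some p, none => some p
  | some p, some q => if q.1 < p.1 then some q else some p

theorem mk2_none_right (a : Option (Int × String)) : mk2 a none = a := by
  cases a <;> rfl

theorem mk2_assoc (a b c : Option (Int × String)) :
    mk2 (mk2 a b) c = mk2 a (mk2 b c) := by
  rcases a with _ | ⟨ra, sa⟩ <;> rcases b with _ | ⟨rb, sb⟩ <;> rcases c with _ | ⟨rc, sc⟩ <;>
    simp only [mk2] <;> split_ifs <;> simp only [mk2] <;> split_ifs <;>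
      first | rfl | (exfalso; omega)

theorem rkAux_ge (cs : List String) : ∀ (k : Int) (h : String) (r : Int),
    rkAux k cs h = some r → k ≤ r := by
  induction cs with
  | nil => intro k h r hr; simp [rkAux] at hr
  | cons c rest ih =>
    intro k h r hr
    simp only [rkAux] at hr
    split at hr
    · injection hr with hh; omega
    · have := ih (k + 1) h r hr; omega

theorem nf_ge (cs : List String) : ∀ (k : Int) (hs : List String) (p : Int × String),
    nf k cs hs = some p → k ≤ p.1 := by
  induction cs with
  | nil => intro k hs p hp; simp [nf] at hp
  | cons c rest ih =>
    intro k hs p hp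
    simp only [nf] at hp
    split at hp
    · cases hp; simp
    · have := ih (k + 1) hs p hp; omega

theorem nf_nil (cs : List String) (k : Int) : nf k cs [] = none := by
  induction cs generalizing k with
  | nil => rfl
  | cons c rest ih => simp [nf, ih]

theorem hset_contains (headers : List String) : ∀ (d : PySem.Dict String String) (c : String),
    (headers.foldl (fun d h => d.insert h h) d).contains c
      = (d.contains c || headers.contains c) := by
  induction headers with
  | nil => intro d c; simp
  | cons h t ih =>
    intro d c
    simp only [List.foldl_cons, ih, PySem.Dict.contains_insert, List.contains_cons]
    cases hb : c == h <;> cases hd : d.contains c <;> simp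

theorem pyPick_eq (headers cs : List String) :
    pyPick (headers.foldl (fun d h => d.insert h h) PySem.Dict.empty) cs
      = pickC headers cs := by
  induction cs with
  | nil => rfl
  | cons c rest ih =>
    simp only [pyPick, pickC, ih, hset_contains, PySem.Dict.contains_empty, Bool.false_or]

theorem rkAux_of_not_mem (cs : List String) : ∀ (k : Int) (h : String), h ∉ cs →
    rkAux k cs h = none := by
  induction cs with
  | nil => intro k h _; rfl
  | cons c rest ih =>
    intro k h hm
    simp only [List.mem_cons, not_or] at hm
    simp [rkAux, hm.1, ih _ _ hm.2]

theorem rank_get (cs : List String) : ∀ (k : Int) (d : PySem.Dict String Int) (h : String),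
    cs.Nodup →
    ((PySem.List.enumerate cs k).foldl (fun d p => d.insert p.2 p.1) d).get? h
      = match rkAux k cs h with
        | some r => some r
        | none => d.get? h := by
  induction cs with
  | nil => intro k d h _; rfl
  | cons c rest ih =>
    intro k d h hnd
    rw [List.nodup_cons] at hnd
    rw [PySem.List.enumerate_cons]
    simp only [List.foldl_cons]
    rw [ih (k + 1) (d.insert c k) h hnd.2]
    by_cases hc : h = c
    · subst hc
      rw [rkAux_of_not_mem rest (k + 1) h hnd.1]
      simp [rkAux, PySem.Dict.get?_insert_self]
    · simp only [rkAux, if_neg hc]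
      cases rkAux (k + 1) rest h <;> simp [PySem.Dict.get?_insert_of_ne _ _ hc]

theorem mk2_step (cs : List String) (hnd : cs.Nodup) (acc : Option (Int × String)) (h : String) :
    (match (pvRankDict cs).get? h with
     | none => acc
     | some r =>
       match acc with
       | none => some (r, h)
       | some p => if r < p.1 then some (r, h) else some p)
      = mk2 acc ((rkAux 0 cs h).map (fun r => (r, h))) := by
  show (match ((PySem.List.enumerate cs 0).foldl (fun d p => d.insert p.2 p.1)
      PySem.Dict.empty).get? h with
     | none => acc
     | some r =>
       match acc with
       | none => some (r, h)
       | some p => if r < p.1 then some (r, h) else some p) = _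
  rw [rank_get cs 0 PySem.Dict.empty h hnd]
  cases rkAux 0 cs h <;> cases acc <;> simp [mk2, PySem.Dict.get?_empty]

theorem mk2_nf (cs : List String) : ∀ (k : Int) (h : String) (t : List String),
    mk2 ((rkAux k cs h).map (fun r => (r, h))) (nf k cs t) = nf k cs (h :: t) := by
  induction cs with
  | nil => intro k h t; rfl
  | cons c rest ih =>
    intro k h t
    by_cases hc : h = c
    · rw [hc]
      simp only [rkAux, nf, Option.map_some, List.contains_cons, beq_self_eq_true,
        Bool.true_or, if_true]
      by_cases ht : t.contains c = true
      · have hm : c ∈ t := by simpa using ht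
        simp [hm, mk2]
      · simp only [ht, Bool.false_eq_true, if_false]
        cases hr : nf (k + 1) rest t with
        | none => simp [mk2]
        | some p =>
          have := nf_ge rest (k + 1) t p hr
          simp only [mk2]
          rw [if_neg (by omega)]
    · have hbc : (c == h) = false := by
        simp only [beq_eq_false_iff_ne, ne_eq]
        exact fun e => hc e.symm
      simp only [rkAux, if_neg hc, nf, List.contains_cons, hbc, Bool.false_or]
      by_cases ht : t.contains c = true
      · simp only [ht]
        cases hr : rkAux (k + 1) rest h with
        | none => simp [mk2]
        | some r =>
          have hkr : k < r := by have := rkAux_ge rest (k + 1) h r hr; omega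
          simp [mk2, hkr]
      · simp only [ht, Bool.false_eq_true, if_false]
        exact ih (k + 1) h t

theorem bestFold_eq (cs : List String) (hnd : cs.Nodup) (headers : List String) :
    pvBestFold (pvRankDict cs) headers = nf 0 cs headers := by
  have main : ∀ (t : List String) (acc : Option (Int × String)),
      t.foldl (fun best h =>
        match (pvRankDict cs).get? h with
        | none => best
        | some r =>
          match best with
          | none => some (r, h)
          | some p => if r < p.1 then some (r, h) else some p) acc
        = mk2 acc (nf 0 cs t) := by
    intro t
    induction t with
    | nil => intro acc; simp [nf_nil, mk2_none_right]
    | cons h t ih =>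
      intro acc
      simp only [List.foldl_cons]
      rw [ih, mk2_step cs hnd acc h, mk2_assoc, mk2_nf]
  show List.foldl _ none headers = _
  rw [main headers none]
  rfl

theorem nf_snd (cs : List String) : ∀ (k : Int) (headers : List String),
    (match nf k cs headers with
     | none => none
     | some q => some q.2) = pickC headers cs := by
  induction cs with
  | nil => intro k headers; rfl
  | cons c rest ih =>
    intro k headers
    simp only [nf, pickC]
    by_cases hc : headers.contains c = true
    · have hm : c ∈ headers := by simpa using hc
      simp [hm]
    · simp only [hc, Bool.false_eq_true, if_false]
      exact ih (k + 1) headers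

theorem fieldB_eq_pick (cs : List String) (hnd : cs.Nodup) (headers : List String) :
    (match pvBestFold (pvRankDict cs) headers with
     | none => none
     | some q => some q.2)
      = pyPick (headers.foldl (fun d h => d.insert h h) PySem.Dict.empty) cs := by
  rw [bestFold_eq cs hnd headers, nf_snd cs 0 headers, pyPick_eq]

-- ===== VERDICT (by name: the statement is the Claim_ definition above) =====
theorem build_col_map_py_spec : Claim_equal_build_col_map_py := by
  intro headers _
  unfold Spec_build_col_map_py
  simp only [build_col_map_py, build_col_map_py_alt, pvFieldsB, List.foldl,
    List.nil_append, List.cons_append]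
  rw [fieldB_eq_pick ["Game Name", "Title", "Game", "Name"] (by decide) headers,
      fieldB_eq_pick ["Developer", "Manufacturer", "Vendor", "Publisher"] (by decide) headers,
      fieldB_eq_pick ["Year", "Release Year", "Released"] (by decide) headers,
      fieldB_eq_pick ["Platforms", "Platform", "System", "Emulator"] (by decide) headers,
      fieldB_eq_pick ["Genres", "Genre", "Category"] (by decide) headers,
      fieldB_eq_pick ["Recommended Platform", "Recommended", "Best Platform"] (by decide) headers,
      fieldB_eq_pick ["Rank", "Ranking"] (by decide) headers]
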